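-- pv_equiv track=rewrite | github.com/cmplx-xyttmt/competitive-programming | python/src/kickstart/2022_practice_round_2/irregular_expressions.py | is_spell
-- ===== SOURCE A (Python) =====
-- vowels = {'a', 'e', 'i', 'o', 'u'}
--
-- def syllables(word):
--     return sum([int(c in vowels) for c in word])
--
-- def is_spell(word):
--     # i < len(word) - i
--     for i in range(1, len(word)):
--         if i >= len(word) - i:
--             break
--         start = word[:i]
--         end = word[len(word) - i:]
--         mid = word[i:len(word) - i]
--         if start == end and syllables(start) >= 2 and syllables(mid) >= 1:
--             return True
--     return False
-- ===== SOURCE B (Python) =====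
-- def is_spell(word):
--     n = len(word)
--     pref = [0]
--     for c in word:
--         pref.append(pref[-1] + (c in "aeiou"))
--     return any(pref[i] >= 2 and pref[n - i] - pref[i] >= 1 and word[:i] == word[n - i:]
--                for i in range(1, (n + 1) // 2))
-- ===== Notes on version B (the rewrite author's own statement) =====
-- stated objective: faster
-- what changed: A recounts vowels of the prefix and of the middle with a fresh O(n) scan at every candidate border length; B builds one vowel prefix-sum array up front so both counts become O(1) lookups, checks the cheap count conditions before the slice comparison, and replaces the loop-with-break by a single any() over the closed-form range 1..(n+1)//2.
import Mathlib
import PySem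

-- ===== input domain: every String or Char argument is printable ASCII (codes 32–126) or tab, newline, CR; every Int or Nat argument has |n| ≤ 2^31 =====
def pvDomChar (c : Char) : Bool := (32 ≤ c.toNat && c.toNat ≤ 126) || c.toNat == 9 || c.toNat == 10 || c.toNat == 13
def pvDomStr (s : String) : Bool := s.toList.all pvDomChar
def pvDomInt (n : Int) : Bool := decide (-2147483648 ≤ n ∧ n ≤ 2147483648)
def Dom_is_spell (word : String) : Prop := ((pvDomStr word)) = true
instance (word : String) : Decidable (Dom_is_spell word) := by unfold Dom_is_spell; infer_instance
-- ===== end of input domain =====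

-- B replaces A's per-candidate vowel recounts by one prefix-sum array built up front (objective: faster, constant factor).

-- ===== PORT A =====
def vowels : PySem.Set Char := PySem.Set.ofList ['a', 'e', 'i', 'o', 'u']

def syllables (w : List Char) : Int :=
  (w.map (fun c => if PySem.Set.contains vowels c then (1 : Int) else 0)).sum

def isSpellLoop (w : List Char) : List Int → Bool
  | [] => false
  | i :: rest =>
    if i ≥ (w.length : Int) - i then false   -- break → return False
    else
      let start := PySem.List.slice w none (some i)
      let stop  := PySem.List.slice w (some ((w.length : Int) - i)) none
      let mid   := PySem.List.slice w (some i) (some ((w.length : Int) - i))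
      if start = stop ∧ syllables start ≥ 2 ∧ syllables mid ≥ 1 then true
      else isSpellLoop w rest

def is_spell (word : String) : Bool :=
  isSpellLoop word.toList (PySem.List.pyRange 1 (word.toList.length : Int) 1)

-- ===== PORT B =====
def prefFold (w : List Char) : List Int :=
  w.foldl
    (fun p c =>
      p ++ [PySem.List.pyGetD p (-1) 0 + (if ("aeiou".toList.contains c) then (1 : Int) else 0)])
    [0]

def is_spell_alt (word : String) : Bool :=
  let w := word.toList
  let n : Int := (w.length : Int)
  let pref := prefFold w
  (PySem.List.pyRange 1 (PySem.Int.floordiv (n + 1) 2) 1).any (fun i =>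
    decide (2 ≤ PySem.List.pyGetD pref i 0) &&
    decide (1 ≤ PySem.List.pyGetD pref (n - i) 0 - PySem.List.pyGetD pref i 0) &&
    decide (PySem.List.slice w none (some i) = PySem.List.slice w (some (n - i)) none))

-- ===== PRECONDITION & SPEC =====
def Spec_is_spell (word : String) (out : Bool) : Prop := out = is_spell_alt word
instance (word : String) (out : Bool) : Decidable (Spec_is_spell word out) := by unfold Spec_is_spell; infer_instance

-- ===== CLAIM (what is proved, stated in full; the proofs are below) =====
def Claim_equal_is_spell : Prop := ∀ (word : String), Dom_is_spell word → Spec_is_spell word (is_spell word)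

-- ===== LEMMAS AND PROOFS =====

-- the condition tested inside A's loop at candidate i, as a Bool
def acond (w : List Char) (i : Int) : Bool :=
  decide (PySem.List.slice w none (some i) = PySem.List.slice w (some ((w.length : Int) - i)) none ∧
    syllables (PySem.List.slice w none (some i)) ≥ 2 ∧
    syllables (PySem.List.slice w (some i) (some ((w.length : Int) - i))) ≥ 1)

lemma vowel_test_eq (c : Char) :
    PySem.Set.contains vowels c = "aeiou".toList.contains c := by
  have h : vowels = ['a', 'e', 'i', 'o', 'u'] := by decide
  rw [h]; rfl

lemma vowel_ite_eq (c : Char) :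
    (if ("aeiou".toList.contains c) then (1 : Int) else 0) =
    (if PySem.Set.contains vowels c then (1 : Int) else 0) := by
  rw [vowel_test_eq]

lemma syllables_append (u v : List Char) :
    syllables (u ++ v) = syllables u + syllables v := by
  simp [syllables]

lemma prefFold_eq (w : List Char) :
    prefFold w = (List.range (w.length + 1)).map (fun k => syllables (w.take k)) := by
  induction w using List.reverseRecOn with
  | nil => simp [prefFold, syllables]
  | append_singleton w c ih =>
    have step : prefFold (w ++ [c]) =
        prefFold w ++ [PySem.List.pyGetD (prefFold w) (-1) 0 +
          (if ("aeiou".toList.contains c) then (1 : Int) else 0)] := by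
      simp [prefFold, List.foldl_append]
    rw [step, ih]
    have hlast : PySem.List.pyGetD
        ((List.range (w.length + 1)).map (fun k => syllables (w.take k))) (-1) 0 = syllables w := by
      rw [List.range_succ, List.map_append, List.map_cons, List.map_nil]
      rw [PySem.List.pyGetD_neg_one_append_singleton]
      simp
    rw [hlast, vowel_ite_eq]
    rw [List.length_append, List.length_singleton, List.range_succ (n := w.length + 1), List.map_append]
    congr 1
    · apply List.map_congr_left
      intro k hk
      simp only [List.mem_range] at hk
      rw [List.take_append_of_le_length (by omega)]
    · rw [List.map_cons, List.map_nil]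
      rw [List.take_of_length_le (by simp)]
      rw [syllables_append]
      simp [syllables]

lemma any_congr_mem {α : Type} (l : List α) (f g : α → Bool)
    (h : ∀ a ∈ l, f a = g a) : l.any f = l.any g := by
  induction l with
  | nil => rfl
  | cons x xs ih =>
    simp only [List.any_cons, h x (by simp), ih (fun a ha => h a (by simp [ha]))]

lemma loop_split (w : List Char) (L R : List Int)
    (h : ∀ i ∈ L, i < (w.length : Int) - i) :
    isSpellLoop w (L ++ R) = ((L.any (fun i => acond w i)) || isSpellLoop w R) := by
  induction L with
  | nil => simp
  | cons i L' ih =>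
    have hi := h i (by simp)
    rw [List.cons_append, isSpellLoop]
    rw [if_neg (by omega)]
    by_cases hc : (PySem.List.slice w none (some i) =
          PySem.List.slice w (some ((w.length : Int) - i)) none ∧
          syllables (PySem.List.slice w none (some i)) ≥ 2 ∧
          syllables (PySem.List.slice w (some i) (some ((w.length : Int) - i))) ≥ 1)
    · rw [if_pos hc]
      have ha : acond w i = true := by unfold acond; exact decide_eq_true hc
      rw [List.any_cons, ha, Bool.true_or, Bool.true_or]
    · rw [if_neg hc]
      rw [ih (fun j hj => h j (List.mem_cons_of_mem _ hj))]
      have ha : acond w i = false := by unfold acond; exact decide_eq_false hc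
      rw [List.any_cons, ha, Bool.false_or]

lemma loop_break (w : List Char) (m : Int) (hm : (w.length : Int) - m ≤ m) :
    isSpellLoop w (PySem.List.pyRange m (w.length : Int) 1) = false := by
  by_cases h : m < (w.length : Int)
  · rw [PySem.List.pyRange_one_cons h, isSpellLoop, if_pos (by omega)]
  · rw [PySem.List.pyRange_one_eq_nil (by omega), isSpellLoop]

lemma pref_lookup (w : List Char) (i : Int) (h0 : 0 ≤ i) (h1 : i ≤ (w.length : Int)) :
    PySem.List.pyGetD (prefFold w) i 0 = syllables (w.take i.toNat) := by
  rw [prefFold_eq]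
  rw [PySem.List.pyGetD_eq_getElem _ 0 h0 (by simp; omega)]
  simp

lemma cond_eq (w : List Char) (i : Int) (h0 : 0 < i) (h1 : i < (w.length : Int) - i) :
    acond w i =
      (decide (2 ≤ PySem.List.pyGetD (prefFold w) i 0) &&
       decide (1 ≤ PySem.List.pyGetD (prefFold w) ((w.length : Int) - i) 0 -
                   PySem.List.pyGetD (prefFold w) i 0) &&
       decide (PySem.List.slice w none (some i) =
               PySem.List.slice w (some ((w.length : Int) - i)) none)) := by
  have hn : (0 : Int) ≤ (w.length : Int) := by positivity
  have e1 := pref_lookup w i (by omega) (by omega)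
  have e2 := pref_lookup w ((w.length : Int) - i) (by omega) (by omega)
  have emid : syllables (PySem.List.slice w (some i) (some ((w.length : Int) - i))) =
      syllables (w.take ((w.length : Int) - i).toNat) - syllables (w.take i.toNat) := by
    rw [PySem.List.slice_toNat w (by omega) (by omega)]
    have hsplit : w.take (((w.length : Int) - i).toNat) =
        w.take i.toNat ++ ((w.drop i.toNat).take (((w.length : Int) - i).toNat - i.toNat)) := by
      rw [← List.take_add]
      congr 1
      omega
    have hadd : syllables (w.take (((w.length : Int) - i).toNat)) =
        syllables (w.take i.toNat) +
        syllables ((w.drop i.toNat).take (((w.length : Int) - i).toNat - i.toNat)) := by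
      rw [hsplit, syllables_append]
    omega
  have estart : syllables (PySem.List.slice w none (some i)) = syllables (w.take i.toNat) := by
    rw [PySem.List.slice_to w (by omega)]
  rw [Bool.eq_iff_iff]
  unfold acond
  simp only [decide_eq_true_eq, Bool.and_eq_true]
  rw [emid, estart, e1, e2]
  constructor
  · rintro ⟨ht, h2, h3⟩
    exact ⟨⟨by omega, by omega⟩, ht⟩
  · rintro ⟨⟨h2, h3⟩, ht⟩
    exact ⟨ht, by omega, by omega⟩

theorem is_spell_spec_aux (word : String) : is_spell word = is_spell_alt word := by
  have hB : is_spell_alt word =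
      (PySem.List.pyRange 1 (PySem.Int.floordiv ((word.toList.length : Int) + 1) 2) 1).any (fun i =>
        decide (2 ≤ PySem.List.pyGetD (prefFold word.toList) i 0) &&
        decide (1 ≤ PySem.List.pyGetD (prefFold word.toList) ((word.toList.length : Int) - i) 0 -
                    PySem.List.pyGetD (prefFold word.toList) i 0) &&
        decide (PySem.List.slice word.toList none (some i) =
                PySem.List.slice word.toList (some ((word.toList.length : Int) - i)) none)) := rfl
  rw [hB, is_spell]
  generalize word.toList = w
  have hn0 : (0 : Int) ≤ (w.length : Int) := by positivity
  have hmdiv : PySem.Int.floordiv ((w.length : Int) + 1) 2 = ((w.length : Int) + 1) / 2 :=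
    PySem.Int.floordiv_eq_ediv_of_pos (by omega)
  by_cases hsz : (w.length : Int) = 0
  · rw [PySem.List.pyRange_one_eq_nil (by omega), PySem.List.pyRange_one_eq_nil (by omega)]
    rfl
  · have h1m : 1 ≤ PySem.Int.floordiv ((w.length : Int) + 1) 2 := by omega
    have hmn : PySem.Int.floordiv ((w.length : Int) + 1) 2 ≤ (w.length : Int) := by omega
    rw [PySem.List.pyRange_one_append 1 _ _ h1m hmn]
    rw [loop_split w _ _ (fun i hi => by
      rw [PySem.List.mem_pyRange_one] at hi
      omega)]
    rw [loop_break w _ (by omega), Bool.or_false]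
    apply any_congr_mem
    intro i hi
    rw [PySem.List.mem_pyRange_one] at hi
    exact cond_eq w i (by omega) (by omega)

-- ===== VERDICT (by name: the statement is the Claim_ definition above) =====
theorem is_spell_spec : Claim_equal_is_spell := by
  intro word _
  exact is_spell_spec_aux word
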